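-- pv_equiv track=rewrite | github.com/SaintChimera/WordleHelper | python-bin/most_occuring.py | frequent_letters
-- ===== SOURCE A (Python) =====
-- def frequent_letters(words):
--     letter_dist = {}
--     for word in words:
--         for i in range(len(word)):
--             letter = word[i]
--             if letter in letter_dist:
--                 letter_l = letter_dist[letter]
--                 letter_l[i] += 1
--                 letter_dist[letter] = letter_l
--             else:
--                 letter_l = [0]*5
--                 letter_l[i] = 1
--                 letter_dist[letter] = letter_l
--     return letter_dist
-- ===== SOURCE B (Python) =====
-- def frequent_letters(words):
--     # Phase 1: group the positions of every occurrence by letter (one pass).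
--     occ = {}
--     for word in words:
--         for i, ch in enumerate(word):
--             occ.setdefault(ch, []).append(i)
--     # Phase 2: turn each position list into a 5-slot count vector.
--     return {ch: [positions.count(i) for i in range(5)] for ch, positions in occ.items()}
-- ===== Notes on version B (the rewrite author's own statement) =====
-- stated objective: alternative
-- what changed: B replaces A's single pass that mutates 5-slot count lists in the dict with a two-phase grouping: first collect each letter's occurrence positions, then build each 5-vector with positions.count(i) in a comprehension.
import Mathlib
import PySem

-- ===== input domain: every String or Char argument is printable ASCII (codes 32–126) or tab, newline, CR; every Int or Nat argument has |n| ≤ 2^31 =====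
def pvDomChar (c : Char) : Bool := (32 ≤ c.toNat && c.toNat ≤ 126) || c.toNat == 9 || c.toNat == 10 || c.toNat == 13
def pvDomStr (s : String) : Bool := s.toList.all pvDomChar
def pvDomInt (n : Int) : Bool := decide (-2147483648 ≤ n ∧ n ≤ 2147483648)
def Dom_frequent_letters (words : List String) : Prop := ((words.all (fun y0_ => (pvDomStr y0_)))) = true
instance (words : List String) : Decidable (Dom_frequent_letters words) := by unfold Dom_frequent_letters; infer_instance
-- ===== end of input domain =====

-- B replaces A's single pass mutating 5-slot lists in the dict by a two-phase grouping
-- (collect each letter's positions, then count per position); objective: alternative (same cost).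

-- ===== PORT A =====
def frequent_letters (words : List String) : List (String × List Int) :=
  (words.foldl (fun letter_dist word =>
    (PySem.List.pyRange 0 (PySem.Str.len word) 1).foldl (fun letter_dist i =>
      -- letter = word[i]; i ∈ range(len(word)), so in range
      let letter := String.ofList [PySem.List.pyGetD word.toList i ' ']
      match letter_dist.get? letter with
      | some letter_l =>
          -- letter_l[i] += 1  (IndexError for i ≥ 5 excluded by Pre_)
          letter_dist.insert letter
            (PySem.List.pySetD letter_l i (PySem.List.pyGetD letter_l i 0 + 1))
      | none =>
          -- letter_l = [0]*5; letter_l[i] = 1  (IndexError for i ≥ 5 excluded by Pre_)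
          letter_dist.insert letter (PySem.List.pySetD [0, 0, 0, 0, 0] i 1))
      letter_dist)
    (PySem.Dict.empty : PySem.Dict String (List Int))).items

-- ===== PORT B =====
def frequent_letters_alt (words : List String) : List (String × List Int) :=
  -- phase 1: occ.setdefault(ch, []).append(i)
  let occ : PySem.Dict String (List Int) :=
    words.foldl (fun occ word =>
      (PySem.List.enumerate word.toList).foldl (fun occ p =>
        occ.modify (String.ofList [p.2]) [] (fun l => l ++ [p.1])) occ)
      PySem.Dict.empty
  -- phase 2: {ch: [positions.count(i) for i in range(5)] for ch, positions in occ.items()}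
  occ.items.map (fun q =>
    (q.1, (PySem.List.pyRange 0 5 1).map (fun i => (PySem.List.count q.2 i : Int))))

-- ===== PRECONDITION & SPEC =====
-- Pre_ excludes exactly the inputs on which A raises IndexError: any word longer than 5
-- letters makes A assign into its 5-slot list at position ≥ 5.
def Pre_frequent_letters (words : List String) : Prop :=
  (words.all (fun w => w.toList.length ≤ 5)) = true
instance (words : List String) : Decidable (Pre_frequent_letters words) := by
  unfold Pre_frequent_letters; infer_instance
def pvWitness_frequent_letters : List String := ["hello", "world", "he"]

def Spec_frequent_letters (words : List String) (out : List (String × List Int)) : Prop := out = frequent_letters_alt words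
instance (words : List String) (out : List (String × List Int)) : Decidable (Spec_frequent_letters words out) := by unfold Spec_frequent_letters; infer_instance

-- ===== CLAIM (what is proved, stated in full; the proofs are below) =====
def Claim_equal_frequent_letters : Prop := ∀ (words : List String), Dom_frequent_letters words → Pre_frequent_letters words → Spec_frequent_letters words (frequent_letters words)

-- ===== LEMMAS AND PROOFS =====

-- the stream of (letter, position) events, in A's processing order
def pvEvs (words : List String) : List (String × Int) :=
  words.flatMap (fun w => (PySem.List.enumerate w.toList).map (fun p => (String.ofList [p.2], p.1)))

-- canonical count vector of a letter over an event list
def pvVec (l : List (String × Int)) (ch : String) : List Int :=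
  (PySem.List.pyRange 0 5 1).map (fun i => (l.count (ch, i) : Int))

-- canonical table: first-occurrence letters, each with its count vector
def pvTbl (l : List (String × Int)) : List (String × List Int) :=
  (PySem.Set.ofList (l.map (·.1))).map (fun ch => (ch, pvVec l ch))

-- A's loop body as a step over one event
def pvStepA (d : PySem.Dict String (List Int)) (p : String × Int) : PySem.Dict String (List Int) :=
  match d.get? p.1 with
  | some letter_l => d.insert p.1 (PySem.List.pySetD letter_l p.2 (PySem.List.pyGetD letter_l p.2 0 + 1))
  | none => d.insert p.1 (PySem.List.pySetD [0, 0, 0, 0, 0] p.2 1)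

lemma pvA_eq_foldl (words : List String) :
    frequent_letters words = ((pvEvs words).foldl pvStepA PySem.Dict.empty).items := by
  unfold frequent_letters pvEvs
  rw [List.foldl_flatMap]
  refine congrArg (fun d => PySem.Dict.items d) ?_
  apply PySem.List.foldl_congr_mem
  intro d w _
  rw [List.foldl_map, PySem.List.enumerate_eq_map_pyRange (d := ' '), List.foldl_map]
  simp only [PySem.Str.len_eq]
  rfl

lemma pvSet_map_pyRange (f : Int → Int) (n : Int) (i : Int) (v : Int)
    (h0 : 0 ≤ i) (h : i < n) :
    ((PySem.List.pyRange 0 n 1).map f).set i.toNat v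
      = (PySem.List.pyRange 0 n 1).map (fun j => if j = i then v else f j) := by
  apply List.ext_getElem
  · simp
  · intro k hk1 hk2
    simp only [PySem.List.length_pyRange_one, List.length_set, List.length_map] at hk1
    rw [List.getElem_set, List.getElem_map, List.getElem_map,
      PySem.List.getElem_pyRange_one]
    by_cases hki : i.toNat = k
    · have : (0 : Int) + (k : Int) = i := by omega
      simp [hki, this]
    · have h2 : ¬ ((k : Int) = i) := by omega
      simp [hki, h2]

lemma pvVec_append_ne (l : List (String × Int)) (p : String × Int) (ch : String)
    (h : ch ≠ p.1) : pvVec (l ++ [p]) ch = pvVec l ch := by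
  unfold pvVec
  apply List.map_congr_left
  intro j _
  have hne : p ≠ (ch, j) := fun he => h (by rw [he])
  simp [List.count_append, List.count_singleton, hne]

lemma pvVec_append_self (l : List (String × Int)) (p : String × Int)
    (h0 : 0 ≤ p.2) (h5 : p.2 < 5) :
    pvVec (l ++ [p]) p.1
      = PySem.List.pySetD (pvVec l p.1) p.2 (PySem.List.pyGetD (pvVec l p.1) p.2 0 + 1) := by
  unfold pvVec
  rw [PySem.List.pyGetD_map_pyRange_of_nonneg _ 5 p.2 0 h0 h5,
    PySem.List.pySetD_of_nonneg _ _ h0, pvSet_map_pyRange _ 5 p.2 _ h0 h5]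
  apply List.map_congr_left
  intro j _
  by_cases hj : j = p.2
  · have heq : p = (p.1, j) := by rw [hj]
    simp [hj, List.count_append, List.count_singleton, ← heq]
  · have hne : p ≠ (p.1, j) := fun he => hj (by rw [he])
    simp [hj, List.count_append, List.count_singleton, hne]

lemma pvVec_fresh (l : List (String × Int)) (p : String × Int)
    (h0 : 0 ≤ p.2) (h5 : p.2 < 5) (hfresh : p.1 ∉ l.map (fun q => q.1)) :
    pvVec (l ++ [p]) p.1 = PySem.List.pySetD [0, 0, 0, 0, 0] p.2 1 := by
  have hz : ([0, 0, 0, 0, 0] : List Int) = (PySem.List.pyRange 0 5 1).map (fun _ => 0) := by decide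
  unfold pvVec
  rw [hz, PySem.List.pySetD_of_nonneg _ _ h0, pvSet_map_pyRange _ 5 p.2 _ h0 h5]
  apply List.map_congr_left
  intro j _
  have hc : l.count (p.1, j) = 0 := by
    rw [List.count_eq_zero]
    intro hmem
    exact hfresh (List.mem_map.mpr ⟨(p.1, j), hmem, rfl⟩)
  by_cases hj : j = p.2
  · have heq : p = (p.1, j) := by rw [hj]
    have hc' : List.count p l = 0 := heq ▸ hc
    simp [hj, List.count_append, ← heq, hc']
  · have hne : p ≠ (p.1, j) := fun he => hj (by rw [he])
    simp [hj, List.count_append, List.count_singleton, hne, hc]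

lemma pvTbl_keys (l : List (String × Int)) :
    (PySem.Dict.mk (pvTbl l)).keys = PySem.Set.ofList (l.map (fun q => q.1)) := by
  unfold pvTbl
  simp only [PySem.Dict.keys_mk, List.map_map]
  have : ((fun (x : String × List Int) => x.1) ∘ fun ch => (ch, pvVec l ch)) = id := by
    funext ch; rfl
  rw [this, List.map_id]

lemma pvStepA_tbl (l : List (String × Int)) (p : String × Int) (h0 : 0 ≤ p.2) (h5 : p.2 < 5) :
    pvStepA (PySem.Dict.mk (pvTbl l)) p = PySem.Dict.mk (pvTbl (l ++ [p])) := by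
  have hnd : (PySem.Dict.mk (pvTbl l)).keys.Nodup := by
    rw [pvTbl_keys]; exact PySem.Set.nodup_ofList _
  by_cases hmem : p.1 ∈ PySem.Set.ofList (l.map (fun q => q.1))
  · -- existing letter
    have hget : (PySem.Dict.mk (pvTbl l)).get? p.1 = some (pvVec l p.1) := by
      exact PySem.Dict.get?_of_mem_items _ (List.mem_map.mpr ⟨p.1, hmem, rfl⟩) hnd
    have hcont : (PySem.Dict.mk (pvTbl l)).contains p.1 = true := by
      rw [PySem.Dict.contains_iff_mem_keys, pvTbl_keys]; exact hmem
    unfold pvStepA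
    rw [hget]
    apply PySem.Dict.ext
    rw [PySem.Dict.items_insert_of_contains _ _ hcont]
    show (pvTbl l).map _ = pvTbl (l ++ [p])
    unfold pvTbl
    have hS : PySem.Set.ofList ((l ++ [p]).map (fun q => q.1))
        = PySem.Set.ofList (l.map (fun q => q.1)) := by
      rw [List.map_append, List.map_singleton, PySem.Set.ofList_append_singleton,
        PySem.Set.add_of_mem hmem]
    rw [hS, List.map_map]
    apply List.map_congr_left
    intro ch hch
    by_cases hc : ch = p.1
    · subst hc
      simp [pvVec_append_self l p h0 h5]
    · have : (ch == p.1) = false := by simp [hc]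
      simp [Function.comp, this, pvVec_append_ne l p ch hc]
  · -- new letter
    have hget : (PySem.Dict.mk (pvTbl l)).get? p.1 = none := by
      rw [PySem.Dict.get?_eq_none_iff_not_mem_keys, pvTbl_keys]; exact hmem
    have hcont : (PySem.Dict.mk (pvTbl l)).contains p.1 = false := by
      rw [← Bool.not_eq_true, PySem.Dict.contains_iff_mem_keys, pvTbl_keys]; exact hmem
    unfold pvStepA
    rw [hget]
    apply PySem.Dict.ext
    rw [PySem.Dict.items_insert_of_not_contains _ _ hcont]
    show pvTbl l ++ [(p.1, PySem.List.pySetD [0, 0, 0, 0, 0] p.2 1)] = pvTbl (l ++ [p])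
    have hfresh : p.1 ∉ l.map (fun q => q.1) := fun h =>
      hmem ((PySem.Set.mem_ofList _ _).mpr h)
    unfold pvTbl
    have hS : PySem.Set.ofList ((l ++ [p]).map (fun q => q.1))
        = PySem.Set.ofList (l.map (fun q => q.1)) ++ [p.1] := by
      rw [List.map_append, List.map_singleton, PySem.Set.ofList_append_singleton,
        PySem.Set.add_of_not_mem hmem]
    rw [hS, List.map_append, List.map_singleton]
    congr 1
    · apply List.map_congr_left
      intro ch hch
      have hc : ch ≠ p.1 := fun he => hmem (he ▸ hch)
      rw [pvVec_append_ne l p ch hc]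
    · rw [pvVec_fresh l p h0 h5 hfresh]

lemma pvFoldA_tbl (evs : List (String × Int)) (pre : List (String × Int))
    (h : ∀ p ∈ evs, 0 ≤ p.2 ∧ p.2 < 5) :
    evs.foldl pvStepA (PySem.Dict.mk (pvTbl pre)) = PySem.Dict.mk (pvTbl (pre ++ evs)) := by
  induction evs generalizing pre with
  | nil => simp
  | cons p evs ih =>
    have hp := h p (by simp)
    rw [List.foldl_cons, pvStepA_tbl pre p hp.1 hp.2,
      ih (pre ++ [p]) (fun q hq => h q (by simp [hq]))]
    simp

lemma pvCount_filter_map (l : List (String × Int)) (ch : String) (i : Int) :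
    ((l.filter (fun q => q.1 == ch)).map (·.2)).count i = l.count (ch, i) := by
  induction l with
  | nil => simp
  | cons q l ih =>
    by_cases hq : q.1 = ch
    · by_cases hi : q.2 = i
      · have : q = (ch, i) := Prod.ext hq hi
        simp [this, List.count_cons, ih]
      · have : q ≠ (ch, i) := fun h => hi (by rw [h])
        simp [List.filter_cons, hq, List.count_cons, hi, this, ih]
    · have : q ≠ (ch, i) := fun h => hq (by rw [h])
      simp [List.filter_cons, hq, List.count_cons, this, ih]

lemma pvOcc_eq (words : List String) :
    (words.foldl (fun occ word =>
      (PySem.List.enumerate word.toList).foldl (fun occ p =>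
        occ.modify (String.ofList [p.2]) [] (fun l => l ++ [p.1])) occ)
      (PySem.Dict.empty : PySem.Dict String (List Int)))
    = (pvEvs words).foldl (fun d q => d.modify q.1 [] (fun l => l ++ [q.2])) PySem.Dict.empty := by
  unfold pvEvs
  rw [List.foldl_flatMap]
  apply PySem.List.foldl_congr_mem
  intro d w _
  rw [List.foldl_map]

lemma pvB_eq_tbl (words : List String) :
    frequent_letters_alt words = pvTbl (pvEvs words) := by
  unfold frequent_letters_alt
  rw [pvOcc_eq]
  set E := pvEvs words with hE
  set occ := E.foldl (fun d q => d.modify q.1 [] (fun l => l ++ [q.2]))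
    (PySem.Dict.empty : PySem.Dict String (List Int)) with hocc
  have hnd : occ.keys.Nodup := by
    rw [hocc]
    exact PySem.Dict.nodup_keys_foldl_modify_key E (fun q => q.1) [] (fun _ q l => l ++ [q.2])
      PySem.Dict.empty (by simp [PySem.Dict.keys_empty])
  have hkeys : occ.keys = PySem.Set.ofList (E.map (fun q => q.1)) := by
    rw [hocc, PySem.Dict.keys_foldl_modify_key]
    simp [PySem.Dict.keys_empty, PySem.Set.update_nil_left]
  have hgetD : ∀ ch, occ.getD ch [] = (E.filter (fun q => q.1 == ch)).map (fun q => q.2) := by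
    intro ch
    rw [hocc, PySem.Dict.getD_foldl_modify_append]
    simp [PySem.Dict.getD_empty]
  show (List.map (fun q => (q.1, List.map (fun i => ((PySem.List.count q.2 i : Int))) (PySem.List.pyRange 0 5 1))) occ.items) = pvTbl E
  rw [PySem.Dict.items_eq_map_keys occ hnd [], hkeys, List.map_map]
  unfold pvTbl
  apply List.map_congr_left
  intro ch _
  simp only [Function.comp]
  rw [hgetD ch]
  unfold pvVec
  congr 1
  apply List.map_congr_left
  intro i _
  rw [PySem.List.count_eq, pvCount_filter_map]

lemma pvEvs_bound (words : List String) (hPre : Pre_frequent_letters words) :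
    ∀ p ∈ pvEvs words, 0 ≤ p.2 ∧ p.2 < 5 := by
  intro p hp
  simp only [pvEvs, List.mem_flatMap, List.mem_map] at hp
  obtain ⟨w, hw, q, hq, rfl⟩ := hp
  rw [PySem.List.mem_enumerate_iff] at hq
  obtain ⟨k, hk, rfl⟩ := hq
  simp only [Pre_frequent_letters, List.all_eq_true, decide_eq_true_eq] at hPre
  have := hPre w hw
  constructor <;> simp <;> omega

-- ===== VERDICT (by name: the statement is the Claim_ definition above) =====
theorem frequent_letters_spec : Claim_equal_frequent_letters := by
  intro words _ hPre
  unfold Spec_frequent_letters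
  rw [pvA_eq_foldl, pvB_eq_tbl]
  have : (pvEvs words).foldl pvStepA (PySem.Dict.mk (pvTbl [])) = PySem.Dict.mk (pvTbl (pvEvs words)) := by
    simpa using pvFoldA_tbl (pvEvs words) [] (pvEvs_bound words hPre)
  have he : (PySem.Dict.empty : PySem.Dict String (List Int)) = PySem.Dict.mk (pvTbl []) := rfl
  rw [he, this]
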